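-- pv_equiv track=rewrite | github.com/amykhuang/poker | poker.py | get_flush
-- ===== SOURCE A (Python) =====
-- JOKER = 100
--
-- ACE = 14
--
-- SUITS = ['heart', 'spade', 'club', 'diamond']
--
-- def filter_by_suit(hand, suit):
--   return [v for (v, s) in hand if s == suit]
--
-- def better_hicard(hand1, hand2):
--   if hand1 == hand2:
--     return hand2
--   if hand1 == []:
--     return hand2
--   if hand2 == []:
--     return hand1
--
--   if len(hand1) != len(hand2):
--     raise Exception('comparing different length hands')
--
--   for i in range(len(hand1)):
--     if hand1[i] == hand2[i]:
--       continue
--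
--     if hand1[i] == JOKER: # Joker always resolves to Ace
--       return hand2 if hand2[i] == ACE else hand1
--     if hand2[i] == JOKER:
--       return hand1 if hand1[i] == ACE else hand2
--     return hand1 if hand1[i] > hand2[i] else hand2
--
--   raise Exception('end of hand comparison')
--
-- def get_flush(hand_size, hand, num_jokers=0):
--   best_flush = []
--
--   for suit in SUITS:
--     match = filter_by_suit(hand, suit)
--     if len(match) + num_jokers < hand_size:
--       continue
--     match.sort(reverse=True)
--     i = match.count(ACE)  # insert jokers after aces
--     match = (match[:i] + [JOKER] * num_jokers + match[i:])[:hand_size]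
--     best_flush = better_hicard(match, best_flush)
--
--   return best_flush
-- ===== SOURCE B (Python) =====
-- JOKER = 100
--
-- ACE = 14
--
-- SUITS = ['heart', 'spade', 'club', 'diamond']
--
-- def _duel(cand, prev):
--   # winner of one pairwise match, decided at the first mismatching position
--   if prev == [] or cand == prev:
--     return cand
--   if cand == []:
--     return prev
--   k = 0
--   while cand[k] == prev[k]:
--     k += 1
--   a, b = cand[k], prev[k]
--   cand_wins = (b == JOKER and a == ACE) or (a == JOKER and b != ACE) \
--       or (a != JOKER and b != JOKER and a > b)
--   return cand if cand_wins else prev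
--
-- def get_flush(hand_size, hand, num_jokers=0):
--   # one grouping pass over the hand: suit -> (values, ace count); no per-suit rescans
--   groups = {}
--   for v, s in hand:
--     vs, c = groups.get(s, ([], 0))
--     groups[s] = (vs + [v], c + (v == ACE))
--
--   def best_of(suits):
--     # recursion, built back to front: last suit's candidate duels the best of the rest
--     if not suits:
--       return []
--     prev = best_of(suits[:-1])
--     vs, aces = groups.get(suits[-1], ([], 0))
--     if len(vs) + num_jokers < hand_size:
--       return prev
--     vs = sorted(vs, reverse=True)
--     cand = (vs[:aces] + [JOKER] * num_jokers + vs[aces:])[:hand_size]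
--     return _duel(cand, prev)
--
--   return best_of(SUITS)
-- ===== Notes on version B (the rewrite author's own statement) =====
-- stated objective: alternative
-- what changed: B makes one grouping pass computing each suit's values and ace count together (removing A's four filter scans and the per-suit count scans), replaces A's accumulator loop over SUITS by a back-to-front recursion, and decides each pairwise comparison at the first mismatching index with a single boolean formula instead of A's staged branch loop with raise paths.
-- outside the precondition, e.g. on get_flush(-1, [(5, 'heart'), (3, 'spade'), (2, 'spade')], 0): A returns [3], B returns [3]
import Mathlib
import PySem

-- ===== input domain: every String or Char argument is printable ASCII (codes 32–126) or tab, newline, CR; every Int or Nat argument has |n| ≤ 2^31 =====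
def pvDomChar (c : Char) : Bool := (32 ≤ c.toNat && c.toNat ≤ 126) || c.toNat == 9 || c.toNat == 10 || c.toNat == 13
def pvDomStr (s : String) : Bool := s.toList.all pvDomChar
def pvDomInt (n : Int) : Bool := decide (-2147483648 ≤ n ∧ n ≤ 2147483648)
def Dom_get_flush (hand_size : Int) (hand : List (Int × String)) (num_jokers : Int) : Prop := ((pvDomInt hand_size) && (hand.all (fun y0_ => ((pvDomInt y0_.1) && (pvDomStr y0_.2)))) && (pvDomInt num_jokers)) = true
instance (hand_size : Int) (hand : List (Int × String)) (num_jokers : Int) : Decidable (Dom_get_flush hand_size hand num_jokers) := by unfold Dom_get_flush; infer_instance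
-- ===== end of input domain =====

-- B replaces A's four per-suit filter scans and per-suit ace-count scans by one grouping
-- pass (suit -> values and ace count), processes the suits by recursion built back-to-front
-- instead of A's accumulator loop, and decides each pairwise comparison at the first
-- mismatching position with one boolean formula instead of A's staged branch loop;
-- return value only.

-- ===== PORT A =====
def filter_by_suit (hand : List (Int × String)) (suit : String) : List Int :=
  (hand.filter (fun p => p.2 == suit)).map (fun p => p.1)

-- the 'for i in range(len(hand1))' comparison loop of better_hicard; the fall-through
-- 'raise Exception' at the loop's end is represented by [] (unreached under Pre_)
def bhLoop (o1 o2 : List Int) : List Int → List Int → List Int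
  | a :: t1, b :: t2 =>
      if a = b then bhLoop o1 o2 t1 t2
      else if a = 100 then (if b = 14 then o2 else o1)
      else if b = 100 then (if a = 14 then o1 else o2)
      else if a > b then o1 else o2
  | _, _ => []
def better_hicard (hand1 hand2 : List Int) : List Int :=
  if hand1 = hand2 then hand2
  else if hand1 = [] then hand2
  else if hand2 = [] then hand1
  else if hand1.length ≠ hand2.length then []  -- 'raise Exception' (unreached under Pre_)
  else bhLoop hand1 hand2 hand1 hand2

-- the body of A's 'for suit in SUITS' loop
def stepA (hand_size : Int) (hand : List (Int × String)) (num_jokers : Int)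
    (best_flush : List Int) (suit : String) : List Int :=
  let m := filter_by_suit hand suit
  if (m.length : Int) + num_jokers < hand_size then best_flush
  else
    let ms := PySem.List.sorted m (fun x => x) true
    let i := ms.count 14
    let m2 := PySem.List.slice (ms.take i ++ List.replicate num_jokers.toNat 100 ++ ms.drop i) none (some hand_size)
    better_hicard m2 best_flush

def get_flush (hand_size : Int) (hand : List (Int × String)) (num_jokers : Int) : List Int :=
  ["heart", "spade", "club", "diamond"].foldl (stepA hand_size hand num_jokers) []

-- ===== PORT B =====
-- B's 'while cand[k] == prev[k]: k += 1' mismatch search; running off the end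
-- (IndexError; unreached under Pre_) is represented by []
def duelLoop (cand prev : List Int) : List Int → List Int → List Int
  | a :: t1, b :: t2 =>
      if a = b then duelLoop cand prev t1 t2
      else if (b = 100 ∧ a = 14) ∨ (a = 100 ∧ b ≠ 14) ∨ (a ≠ 100 ∧ b ≠ 100 ∧ a > b)
        then cand else prev
  | _, _ => []
def duel (cand prev : List Int) : List Int :=
  if prev = [] ∨ cand = prev then cand
  else if cand = [] then prev
  else duelLoop cand prev cand prev

-- one grouping pass: suit -> (values in hand order, ace count)
def groupStep (d : PySem.Dict String (List Int × Int)) (p : Int × String) :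
    PySem.Dict String (List Int × Int) :=
  let g := d.getD p.2 ([], 0)
  d.insert p.2 (g.1 ++ [p.1], g.2 + (if p.1 = 14 then 1 else 0))

-- B's recursive best_of: the last suit's candidate duels the best of the other suits;
-- 'aces' is a Python int ≥ 0, so vs[:aces]/vs[aces:] are take/drop at aces
def best_of (groups : PySem.Dict String (List Int × Int)) (hand_size num_jokers : Int) :
    List String → List Int
  | [] => []
  | s0 :: rest =>
      let prev := best_of groups hand_size num_jokers (s0 :: rest).dropLast
      let g := groups.getD ((s0 :: rest).getLast (by simp)) ([], 0)
      if (g.1.length : Int) + num_jokers < hand_size then prev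
      else
        let vs := PySem.List.sorted g.1 (fun x => x) true
        let cand := PySem.List.slice (vs.take g.2.toNat ++ List.replicate num_jokers.toNat 100 ++ vs.drop g.2.toNat) none (some hand_size)
        duel cand prev
  termination_by suits => suits.length
  decreasing_by simp

def get_flush_alt (hand_size : Int) (hand : List (Int × String)) (num_jokers : Int) : List Int :=
  let groups := hand.foldl groupStep PySem.Dict.empty
  best_of groups hand_size num_jokers ["heart", "spade", "club", "diamond"]

-- ===== PRECONDITION & SPEC =====
-- Pre_ excludes negative hand_size (outside the natural domain of 'best flush of hand_size
-- cards'): there A's end-relative truncation match[:hand_size] can yield different-length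
-- candidates on which better_hicard raises an Exception — except when hand_size is so
-- negative that every candidate truncates to [], where both programs just return [].
def Pre_get_flush (hand_size : Int) (hand : List (Int × String)) (num_jokers : Int) : Prop :=
  0 ≤ hand_size ∨ (hand.length : Int) + max num_jokers 0 + hand_size ≤ 0
instance (hand_size : Int) (hand : List (Int × String)) (num_jokers : Int) : Decidable (Pre_get_flush hand_size hand num_jokers) := by unfold Pre_get_flush; infer_instance
def pvWitness_get_flush : Int × (List (Int × String)) × Int := (2, [(5, "heart"), (14, "heart"), (3, "spade")], 1)

def Spec_get_flush (hand_size : Int) (hand : List (Int × String)) (num_jokers : Int) (out : List Int) : Prop := out = get_flush_alt hand_size hand num_jokers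
instance (hand_size : Int) (hand : List (Int × String)) (num_jokers : Int) (out : List Int) : Decidable (Spec_get_flush hand_size hand num_jokers out) := by unfold Spec_get_flush; infer_instance

-- ===== CLAIM (what is proved, stated in full; the proofs are below) =====
def Claim_equal_get_flush : Prop := ∀ (hand_size : Int) (hand : List (Int × String)) (num_jokers : Int), Dom_get_flush hand_size hand num_jokers → Pre_get_flush hand_size hand num_jokers → Spec_get_flush hand_size hand num_jokers (get_flush hand_size hand num_jokers)

-- ===== LEMMAS AND PROOFS =====

-- the grouping pass maps each suit to exactly (A's filter_by_suit list, its ace count)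
lemma groups_getD : ∀ (hand : List (Int × String)) (d : PySem.Dict String (List Int × Int)) (suit : String),
    (hand.foldl groupStep d).getD suit ([], 0)
      = ((d.getD suit ([], 0)).1 ++ filter_by_suit hand suit,
         (d.getD suit ([], 0)).2 + ((filter_by_suit hand suit).count 14 : Int)) := by
  intro hand
  induction hand with
  | nil => intro d suit; simp [filter_by_suit]
  | cons p t ih =>
      intro d suit
      rw [List.foldl_cons, ih]
      by_cases h : suit = p.2
      · subst h
        simp [groupStep, filter_by_suit]
        split_ifs <;> simp [List.count_cons] <;> omega
      · have : (p.2 == suit) = false := by simpa using fun e => h e.symm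
        simp [groupStep, PySem.Dict.getD_insert, h, filter_by_suit, this]

-- B's comparison agrees with A's wherever A does not raise
lemma duel_nilR (c : List Int) : better_hicard c [] = c ∧ duel c [] = c := by
  constructor
  · by_cases h : c = [] <;> simp [better_hicard, h]
  · simp [duel]

lemma duelLoop_or (cand best : List Int) (l1 l2 : List Int) :
    duelLoop cand best l1 l2 = cand ∨ duelLoop cand best l1 l2 = best ∨ duelLoop cand best l1 l2 = [] := by
  induction l1 generalizing l2 with
  | nil => simp [duelLoop]
  | cons a t1 ih =>
      cases l2 with
      | nil => simp [duelLoop]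
      | cons b t2 =>
          simp only [duelLoop]
          split_ifs <;> simp [ih]

lemma duel_or (cand best : List Int) : duel cand best = cand ∨ duel cand best = best ∨ duel cand best = [] := by
  unfold duel
  split_ifs <;> simp [duelLoop_or]

lemma loop_agree (o1 o2 : List Int) : ∀ t1 t2 : List Int, t1.length = t2.length → t1 ≠ t2 →
    bhLoop o1 o2 t1 t2 = duelLoop o1 o2 t1 t2 := by
  intro t1
  induction t1 with
  | nil => intro t2 hlen hne; cases t2 <;> simp_all
  | cons a t1 ih =>
      intro t2 hlen hne
      cases t2 with
      | nil => simp at hlen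
      | cons b t2 =>
          simp only [bhLoop, duelLoop]
          by_cases hab : a = b
          · subst hab
            have hne' : t1 ≠ t2 := by intro h; exact hne (by rw [h])
            rw [if_pos rfl, if_pos rfl]
            exact ih t2 (by simpa using hlen) hne'
          · rw [if_neg hab, if_neg hab]
            by_cases h1 : a = 100 <;> by_cases h2 : b = 100 <;>
              by_cases h3 : a = 14 <;> by_cases h4 : b = 14 <;>
              simp_all

lemma better_eq_duel (h1 h2 : List Int) (hlen : h1.length = h2.length) (h2ne : h2 ≠ []) :
    better_hicard h1 h2 = duel h1 h2 := by
  by_cases heq : h1 = h2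
  · simp [better_hicard, duel, heq]
  · have h1ne : h1 ≠ [] := by
      intro h; subst h; exact h2ne (by cases h2 <;> simp_all)
    unfold better_hicard duel
    rw [if_neg heq, if_neg h1ne, if_neg h2ne, if_neg (by simp [hlen]),
        if_neg (by simp [h2ne, heq]), if_neg h1ne]
    exact loop_agree h1 h2 h1 h2 hlen heq

-- the body of B's recursion, as a step function
def stepB (groups : PySem.Dict String (List Int × Int)) (hand_size num_jokers : Int)
    (best : List Int) (suit : String) : List Int :=
  let g := groups.getD suit ([], 0)
  if (g.1.length : Int) + num_jokers < hand_size then best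
  else
    let vs := PySem.List.sorted g.1 (fun x => x) true
    let cand := PySem.List.slice (vs.take g.2.toNat ++ List.replicate num_jokers.toNat 100 ++ vs.drop g.2.toNat) none (some hand_size)
    duel cand best

lemma best_of_concat (groups : PySem.Dict String (List Int × Int)) (hs nj : Int)
    (l : List String) (s : String) :
    best_of groups hs nj (l ++ [s]) = stepB groups hs nj (best_of groups hs nj l) s := by
  cases l with
  | nil =>
      rw [List.nil_append, best_of.eq_2]
      rw [show ([s]).dropLast = ([] : List String) from List.dropLast_singleton,
          show ([s]).getLast (by simp) = s from List.getLast_singleton _,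
          best_of.eq_1]
      rfl
  | cons a t =>
      rw [List.cons_append, best_of.eq_2]
      rw [show (a :: (t ++ [s])).dropLast = a :: t from by
            rw [← List.cons_append]; exact List.dropLast_concat,
          show (a :: (t ++ [s])).getLast (by simp) = s from by
            have h : ((a :: t) ++ [s]).getLast (by simp) = s := List.getLast_concat
            exact h]
      rfl

lemma best_of_eq_foldl (groups : PySem.Dict String (List Int × Int)) (hs nj : Int)
    (l : List String) : best_of groups hs nj l = l.foldl (stepB groups hs nj) [] := by
  induction l using List.reverseRecOn with
  | nil => rw [best_of.eq_1]; rfl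
  | append_singleton t s ih => rw [best_of_concat, ih, List.foldl_append]; rfl

-- A counts aces after sorting, B during the grouping pass: equal by permutation
lemma count_sorted (m : List Int) :
    (PySem.List.sorted m (fun x => x) true).count 14 = m.count 14 :=
  (PySem.List.sorted_perm m (fun x => x) true).count_eq 14

lemma cand_length (hand_size num_jokers : Int) (m : List Int)
    (h0 : 0 ≤ hand_size) (hg : ¬ ((m.length : Int) + num_jokers < hand_size)) (i : Nat) :
    (PySem.List.slice ((PySem.List.sorted m (fun x => x) true).take i ++ List.replicate num_jokers.toNat 100 ++ (PySem.List.sorted m (fun x => x) true).drop i) none (some hand_size)).length = hand_size.toNat := by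
  rw [PySem.List.slice_to _ h0]
  have hlen : (PySem.List.sorted m (fun x => x) true).length = m.length := PySem.List.length_sorted m (fun x => x) true
  by_cases hi : i ≤ m.length
  · simp only [List.length_take, List.length_append, List.length_replicate, List.length_drop, hlen] at *
    omega
  · simp only [List.length_take, List.length_append, List.length_replicate, List.length_drop, hlen] at *
    omega

lemma fold_agree (hand_size : Int) (hand : List (Int × String)) (num_jokers : Int)
    (h0 : 0 ≤ hand_size) :
    ∀ (suits : List String) (best : List Int), (best = [] ∨ best.length = hand_size.toNat) →
      suits.foldl (stepA hand_size hand num_jokers) best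
        = suits.foldl (stepB (hand.foldl groupStep PySem.Dict.empty) hand_size num_jokers) best := by
  intro suits
  induction suits with
  | nil => intro best _; rfl
  | cons s rest ih =>
      intro best hbest
      simp only [List.foldl_cons]
      unfold stepA stepB
      have hg' : (hand.foldl groupStep PySem.Dict.empty).getD s ([], 0)
          = (filter_by_suit hand s, ((filter_by_suit hand s).count 14 : Int)) := by
        rw [groups_getD]; simp
      rw [hg']
      by_cases hg : ((filter_by_suit hand s).length : Int) + num_jokers < hand_size
      · simp only [if_pos hg]
        exact ih best hbest
      · simp only [if_neg hg]
        have hi : (((filter_by_suit hand s).count 14 : Int)).toNat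
            = (PySem.List.sorted (filter_by_suit hand s) (fun x => x) true).count 14 := by
          rw [count_sorted]; simp
        rw [hi]
        have hclen := cand_length hand_size num_jokers (filter_by_suit hand s) h0 hg
          ((PySem.List.sorted (filter_by_suit hand s) (fun x => x) true).count 14)
        set c := PySem.List.slice ((PySem.List.sorted (filter_by_suit hand s) (fun x => x) true).take ((PySem.List.sorted (filter_by_suit hand s) (fun x => x) true).count 14) ++ List.replicate num_jokers.toNat 100 ++ (PySem.List.sorted (filter_by_suit hand s) (fun x => x) true).drop ((PySem.List.sorted (filter_by_suit hand s) (fun x => x) true).count 14)) none (some hand_size) with hc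
        by_cases hbn : best = []
        · subst hbn
          rw [(duel_nilR c).1, (duel_nilR c).2]
          exact ih c (Or.inr hclen)
        · have hblen : best.length = hand_size.toNat := hbest.resolve_left hbn
          rw [better_eq_duel c best (hclen.trans hblen.symm) hbn]
          refine ih _ ?_
          rcases duel_or c best with h | h | h <;> rw [h]
          · exact Or.inr hclen
          · exact Or.inr hblen
          · exact Or.inl rfl

-- in the very-negative hand_size region every candidate slice is empty …
lemma slice_nil (xs : List Int) (b : Int) (h : (xs.length : Int) + b ≤ 0) :
    PySem.List.slice xs none (some b) = [] := by
  simp only [PySem.List.slice, tsub_zero, List.drop_zero, List.take_eq_nil_iff]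
  unfold PySem.List.clampIdx
  split_ifs <;> omega

lemma cand_nil (hand_size num_jokers : Int) (hand : List (Int × String)) (m : List Int) (i : Nat)
    (hm : m.length ≤ hand.length)
    (hneg : (hand.length : Int) + max num_jokers 0 + hand_size ≤ 0) :
    PySem.List.slice ((PySem.List.sorted m (fun x => x) true).take i ++ List.replicate num_jokers.toNat 100 ++ (PySem.List.sorted m (fun x => x) true).drop i) none (some hand_size) = [] := by
  apply slice_nil
  have hlen : (PySem.List.sorted m (fun x => x) true).length = m.length := PySem.List.length_sorted m (fun x => x) true
  have ht : (num_jokers.toNat : Int) = max num_jokers 0 := Int.toNat_eq_max num_jokers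
  simp only [List.length_append, List.length_take, List.length_replicate, List.length_drop, hlen]
  omega

-- … so both loops keep best_flush = [] throughout
lemma folds_nil (hand_size : Int) (hand : List (Int × String)) (num_jokers : Int)
    (hneg : (hand.length : Int) + max num_jokers 0 + hand_size ≤ 0) :
    ∀ suits : List String,
      suits.foldl (stepA hand_size hand num_jokers) [] = ([] : List Int) ∧
      suits.foldl (stepB (hand.foldl groupStep PySem.Dict.empty) hand_size num_jokers) [] = ([] : List Int) := by
  intro suits
  induction suits with
  | nil => exact ⟨rfl, rfl⟩
  | cons s rest ih =>
      have hm : (filter_by_suit hand s).length ≤ hand.length := by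
        simpa [filter_by_suit] using List.length_filter_le (fun p => p.2 == s) hand
      constructor
      · simp only [List.foldl_cons]
        have : stepA hand_size hand num_jokers [] s = [] := by
          simp only [stepA, cand_nil hand_size num_jokers hand (filter_by_suit hand s) _ hm hneg]
          split_ifs
          · rfl
          · exact (duel_nilR []).1
        rw [this]; exact ih.1
      · simp only [List.foldl_cons]
        have : stepB (hand.foldl groupStep PySem.Dict.empty) hand_size num_jokers [] s = [] := by
          have hg' : (hand.foldl groupStep PySem.Dict.empty).getD s ([], 0)
              = (filter_by_suit hand s, ((filter_by_suit hand s).count 14 : Int)) := by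
            rw [groups_getD]; simp
          simp only [stepB, hg', cand_nil hand_size num_jokers hand (filter_by_suit hand s) _ hm hneg]
          split_ifs
          · rfl
          · exact (duel_nilR []).2
        rw [this]; exact ih.2

-- ===== VERDICT (by name: the statement is the Claim_ definition above) =====
theorem get_flush_spec : Claim_equal_get_flush := by
  intro hs hand nj _ hpre
  unfold Spec_get_flush get_flush get_flush_alt
  rw [best_of_eq_foldl]
  rcases hpre with h0 | hneg
  · exact fold_agree hs hand nj h0 _ [] (Or.inl rfl)
  · rw [(folds_nil hs hand nj hneg _).1, (folds_nil hs hand nj hneg _).2]
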